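-- pv_equiv track=rewrite | github.com/eccomaggio/python | pdf/textScraping/text-monger2.py | split_notes_from_text
-- ===== SOURCE A (Python) =====
-- def split_notes_from_text(field, notes_identifier=None):
--   if not notes_identifier:
--     notes_identifier = "1."
--   notes = []
--
--   note_start = -1
--   for j, line in enumerate(field):
--     if len(line) and line[0].startswith(notes_identifier):
--       note_start = j
--   if note_start >= 0:
--       notes = field[note_start:]
--       field = field[:note_start]
--   return (field, notes)
-- ===== SOURCE B (Python) =====
-- def split_notes_from_text(field, notes_identifier=None):
--   nid = notes_identifier or "1."
--   head, notes = [], []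
--   for line in field:
--     if len(line) and line[0].startswith(nid):
--       # a new (later) notes marker: everything gathered so far belongs to the text
--       head, notes = head + notes, [line]
--     elif notes:
--       notes.append(line)
--     else:
--       head.append(line)
--   return (head, notes)
-- ===== Notes on version B (the rewrite author's own statement) =====
-- stated objective: alternative
-- what changed: Replaces A's index bookkeeping (last-match index accumulator plus two slices) with a single forward pass that builds the two output lists directly, flushing the notes accumulator into the head whenever a later marker line appears; no indices or slicing at all.
import Mathlib
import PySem

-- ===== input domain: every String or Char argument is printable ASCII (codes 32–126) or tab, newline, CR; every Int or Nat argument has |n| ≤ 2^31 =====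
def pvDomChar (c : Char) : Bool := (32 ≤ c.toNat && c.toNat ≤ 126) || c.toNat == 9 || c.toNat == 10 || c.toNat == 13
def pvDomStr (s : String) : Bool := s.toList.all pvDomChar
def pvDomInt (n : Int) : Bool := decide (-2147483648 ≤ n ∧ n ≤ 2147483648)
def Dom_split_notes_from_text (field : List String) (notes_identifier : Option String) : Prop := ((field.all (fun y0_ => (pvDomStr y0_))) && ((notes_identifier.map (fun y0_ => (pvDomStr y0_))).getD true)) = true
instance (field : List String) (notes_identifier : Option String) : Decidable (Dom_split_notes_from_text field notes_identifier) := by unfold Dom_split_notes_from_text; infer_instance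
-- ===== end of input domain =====

-- B replaces A's last-match index accumulator plus two slices by one forward pass that
-- builds the two output lists directly (flushing notes into head on a later marker line).

-- shared by both ports: 'if not notes_identifier: notes_identifier = "1."' / 'notes_identifier or "1."'
def pvNid (notes_identifier : Option String) : String :=
  match notes_identifier with
  | none => "1."
  | some s => if s = "" then "1." else s

-- 'len(line) and line[0].startswith(nid)' (line[0] is the 1-char string of the first char)
def pvGuard (nid : String) (line : String) : Bool :=
  match line.toList with
  | [] => false
  | c :: _ => PySem.Chars.startswith [c] nid.toList

-- ===== PORT A =====
-- 'note_start = -1; for j, line in enumerate(field): if …: note_start = j'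
def pvNoteStart (nid : String) (field : List String) : Int :=
  (PySem.List.enumerate field).foldl (fun acc p => if pvGuard nid p.2 then p.1 else acc) (-1)

def split_notes_from_text (field : List String) (notes_identifier : Option String) : List String × List String :=
  if 0 ≤ pvNoteStart (pvNid notes_identifier) field then
    (PySem.List.slice field none (some (pvNoteStart (pvNid notes_identifier) field)),
     PySem.List.slice field (some (pvNoteStart (pvNid notes_identifier) field)) none)
  else (field, [])

-- ===== PORT B =====
-- 'for line in field: if guard: head, notes = head + notes, [line]
--  elif notes: notes.append(line) else: head.append(line)'
def split_notes_from_text_alt (field : List String) (notes_identifier : Option String) : List String × List String :=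
  field.foldl
    (fun st line =>
      if pvGuard (pvNid notes_identifier) line then (st.1 ++ st.2, [line])
      else if st.2.isEmpty then (st.1 ++ [line], st.2)
      else (st.1, st.2 ++ [line]))
    ([], [])

-- ===== PRECONDITION & SPEC =====
def Spec_split_notes_from_text (field : List String) (notes_identifier : Option String) (out : List String × List String) : Prop := out = split_notes_from_text_alt field notes_identifier
instance (field : List String) (notes_identifier : Option String) (out : List String × List String) : Decidable (Spec_split_notes_from_text field notes_identifier out) := by unfold Spec_split_notes_from_text; infer_instance

-- ===== CLAIM =====
def Claim_equal_split_notes_from_text : Prop := ∀ (field : List String) (notes_identifier : Option String), Dom_split_notes_from_text field notes_identifier → Spec_split_notes_from_text field notes_identifier (split_notes_from_text field notes_identifier)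

-- ===== LEMMAS AND PROOFS =====

-- index of the LAST line satisfying g, if any
def pvLastIdx? (g : String → Bool) : List String → Option Nat
  | [] => none
  | x :: xs =>
      match pvLastIdx? g xs with
      | some k => some (k + 1)
      | none => if g x then some 0 else none

-- A's enumerate-fold computes the last matching index (offset by the start)
theorem foldl_enum_lastIdx (g : String → Bool) (xs : List String) (s : Nat) (a : Int) :
    (PySem.List.enumerate xs (s : Int)).foldl
        (fun acc p => if g p.2 then p.1 else acc) a
      = (match pvLastIdx? g xs with
         | some k => ((s + k : Nat) : Int)
         | none => a) := by
  induction xs generalizing s a with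
  | nil => simp [PySem.List.enumerate_nil, pvLastIdx?]
  | cons x xs ih =>
      rw [PySem.List.enumerate_cons, List.foldl_cons]
      have hs : ((s : Int) + 1) = ((s + 1 : Nat) : Int) := by push_cast; ring
      rw [hs, ih]
      simp only [pvLastIdx?]
      cases hx : pvLastIdx? g xs with
      | some k =>
          simp only []
          push_cast
          ring
      | none => by_cases hg : g x = true <;> simp [hg]

-- B's fold with arbitrary accumulated state, characterised by pvLastIdx?
theorem foldl_alt_state (g : String → Bool) (xs : List String) (h n : List String) :
    xs.foldl
      (fun st line =>
        if g line then (st.1 ++ st.2, [line])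
        else if st.2.isEmpty then (st.1 ++ [line], st.2)
        else (st.1, st.2 ++ [line]))
      (h, n)
    = (match pvLastIdx? g xs with
       | some k => (h ++ n ++ xs.take k, xs.drop k)
       | none => if n.isEmpty then (h ++ xs, n) else (h, n ++ xs)) := by
  induction xs generalizing h n with
  | nil =>
      simp only [List.foldl_nil, pvLastIdx?]
      cases n <;> simp
  | cons x xs ih =>
      rw [List.foldl_cons]
      by_cases hg : g x = true
      · rw [if_pos hg, ih]
        cases hx : pvLastIdx? g xs <;>
          simp [pvLastIdx?, hx, hg, List.take_succ_cons, List.drop_succ_cons]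
      · rw [if_neg hg]
        cases n with
        | nil =>
            simp only [List.isEmpty_nil, if_true]
            rw [ih]
            cases hx : pvLastIdx? g xs <;>
              simp [pvLastIdx?, hx, hg, List.take_succ_cons, List.drop_succ_cons]
        | cons a as =>
            simp only [List.isEmpty_cons, Bool.false_eq_true, if_false]
            rw [ih]
            cases hx : pvLastIdx? g xs <;>
              simp [pvLastIdx?, hx, hg, List.take_succ_cons, List.drop_succ_cons]

-- ===== VERDICT =====
theorem split_notes_from_text_spec : Claim_equal_split_notes_from_text := by
  intro field notes_identifier _
  unfold Spec_split_notes_from_text split_notes_from_text split_notes_from_text_alt pvNoteStart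
  set g := pvGuard (pvNid notes_identifier) with hgdef
  have hA := foldl_enum_lastIdx g field 0 (-1)
  simp only [Nat.cast_zero, Nat.zero_add] at hA
  rw [foldl_alt_state g field [] []]
  cases hx : pvLastIdx? g field with
  | none =>
      rw [hx] at hA
      rw [hA]
      simp
  | some k =>
      rw [hx] at hA
      rw [hA]
      have h0 : (0 : Int) ≤ (k : Int) := Int.natCast_nonneg k
      rw [if_pos h0, PySem.List.slice_to_natCast, PySem.List.slice_from_natCast]
      simp
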